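-- pv_equiv track=rewrite | github.com/nlp-stat-test/nlp-stat-test | run_gui.py | create_test_reasons
-- ===== SOURCE A (Python) =====
-- def create_test_reasons(recommended_tests, test_statistic='mean'):
--     '''
--     This function creates a dictionary of test names with reasons, given the list of test names.
--     @param recommended_tests: List of tuples [('t', "t because..."), ('bootstrap', 'bootstrap because...')]
--     @return: Dictionary of test names with reasons as the values
--     '''
--     #test_reasons = {}
--     #for test in recommended_tests:  # test is a tuple (name, reason)
--     #    test_reasons[test[0]] = test[1]
--     #return test_reasons
--
--     # sort based on reverse order
--     recommended_tests = {k: v for k, v in sorted(recommended_tests.items(),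
--                                                  reverse=True,
--                                                  key=lambda item: item[1])}
--     recommended_list = []
--     not_preferred_list = []
--     not_recommended_list = []
--     for k, v in recommended_tests.items():
--             if v[0] > 0:
--                 recommended_list.append((k, v[1]))
--             elif v[0] == 0:
--                 not_preferred_list.append((k, v[1]))
--             else:
--                 not_recommended_list.append((k, v[1]))
--     return recommended_list, not_preferred_list, not_recommended_list
-- ===== SOURCE B (Python) =====
-- def create_test_reasons(recommended_tests, test_statistic='mean'):
--     '''
--     Partition the tests by the sign of the score first, then sort each of the
--     three buckets independently (same key, reverse=True); stability of sort
--     makes this equal to A's sort-then-partition.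
--     '''
--     items = list(recommended_tests.items())
--
--     def bucket(pred):
--         chosen = sorted([kv for kv in items if pred(kv[1][0])],
--                         key=lambda kv: kv[1], reverse=True)
--         return [(k, v[1]) for k, v in chosen]
--
--     return (bucket(lambda s: s > 0),
--             bucket(lambda s: s == 0),
--             bucket(lambda s: s < 0))
-- ===== Notes on version B (the rewrite author's own statement) =====
-- stated objective: alternative
-- what changed: B partitions the dict items into the three sign buckets first and then sorts each bucket independently (sort key on the value tuple, reverse=True), instead of A's global reverse sort followed by a dict rebuild and a single partitioning loop; stability makes the results identical.
import Mathlib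
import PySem

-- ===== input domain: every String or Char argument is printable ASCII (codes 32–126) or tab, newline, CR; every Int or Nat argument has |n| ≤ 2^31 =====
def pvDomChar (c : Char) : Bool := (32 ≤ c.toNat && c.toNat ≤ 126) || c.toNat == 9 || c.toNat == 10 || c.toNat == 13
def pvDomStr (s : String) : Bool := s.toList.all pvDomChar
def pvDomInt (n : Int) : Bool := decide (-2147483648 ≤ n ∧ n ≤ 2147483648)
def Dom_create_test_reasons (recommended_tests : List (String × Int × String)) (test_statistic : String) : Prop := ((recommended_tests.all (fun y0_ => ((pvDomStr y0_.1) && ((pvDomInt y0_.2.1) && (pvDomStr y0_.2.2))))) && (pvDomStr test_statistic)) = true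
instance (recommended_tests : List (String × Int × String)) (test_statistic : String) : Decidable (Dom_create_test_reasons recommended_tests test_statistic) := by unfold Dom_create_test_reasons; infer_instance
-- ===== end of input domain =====

-- ===== PORT A =====
-- B partitions into sign buckets first and sorts each bucket; A sorts globally then partitions.
def create_test_reasons (recommended_tests : List (String × Int × String)) (test_statistic : String) : (List (String × String)) × (List (String × String)) × (List (String × String)) :=
  -- recommended_tests = {k: v for k, v in sorted(recommended_tests.items(), reverse=True, key=lambda item: item[1])}
  -- then: for k, v in recommended_tests.items(): append (k, v[1]) to one of the three lists
  (PySem.Dict.ofList (PySem.List.sorted2 (PySem.Dict.ofList recommended_tests).items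
      (fun it => it.2.1) (fun it => it.2.2) true)).items.foldl (fun acc kv =>
    if 0 < kv.2.1 then (acc.1 ++ [(kv.1, kv.2.2)], acc.2.1, acc.2.2)
    else if kv.2.1 = 0 then (acc.1, acc.2.1 ++ [(kv.1, kv.2.2)], acc.2.2)
    else (acc.1, acc.2.1, acc.2.2 ++ [(kv.1, kv.2.2)])) ([], [], [])

-- ===== PORT B =====
-- bucket(pred): sort the pred-filtered items by value (reverse=True), keep (k, v[1])
def pvBucket (items : List (String × Int × String)) (pred : Int → Bool) : List (String × String) :=
  (PySem.List.sorted2 (items.filter (fun kv => pred kv.2.1)) (fun kv => kv.2.1) (fun kv => kv.2.2) true).map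
    (fun kv => (kv.1, kv.2.2))

def create_test_reasons_alt (recommended_tests : List (String × Int × String)) (test_statistic : String) : (List (String × String)) × (List (String × String)) × (List (String × String)) :=
  (pvBucket (PySem.Dict.ofList recommended_tests).items (fun s => decide (0 < s)),
   pvBucket (PySem.Dict.ofList recommended_tests).items (fun s => decide (s = 0)),
   pvBucket (PySem.Dict.ofList recommended_tests).items (fun s => decide (s < 0)))

-- ===== PRECONDITION & SPEC =====
def Spec_create_test_reasons (recommended_tests : List (String × Int × String)) (test_statistic : String) (out : (List (String × String)) × (List (String × String)) × (List (String × String))) : Prop := out = create_test_reasons_alt recommended_tests test_statistic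
instance (recommended_tests : List (String × Int × String)) (test_statistic : String) (out : (List (String × String)) × (List (String × String)) × (List (String × String))) : Decidable (Spec_create_test_reasons recommended_tests test_statistic out) := by unfold Spec_create_test_reasons; infer_instance

-- ===== CLAIM (what is proved, stated in full; the proofs are below) =====
def Claim_equal_create_test_reasons : Prop := ∀ (recommended_tests : List (String × Int × String)) (test_statistic : String), Dom_create_test_reasons recommended_tests test_statistic → Spec_create_test_reasons recommended_tests test_statistic (create_test_reasons recommended_tests test_statistic)

-- ===== LEMMAS AND PROOFS =====

-- the `before` relation sorted2 … true uses on our triples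
def pvBef (a b : String × Int × String) : Bool :=
  decide (b.2.1 < a.2.1) || (!decide (a.2.1 < b.2.1) && decide (b.2.2 < a.2.2))

lemma pvBef_true_iff (a b : String × Int × String) :
    pvBef a b = true ↔ b.2.1 < a.2.1 ∨ (¬ a.2.1 < b.2.1 ∧ b.2.2 < a.2.2) := by
  simp [pvBef]

lemma pvBef_false_iff (a b : String × Int × String) :
    pvBef a b = false ↔ ¬ b.2.1 < a.2.1 ∧ (a.2.1 < b.2.1 ∨ ¬ b.2.2 < a.2.2) := by
  simp [pvBef, imp_iff_not_or, or_comm]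

lemma pvBef_asymm (a b : String × Int × String) (h : pvBef a b = true) : pvBef b a = false := by
  rw [pvBef_true_iff] at h
  rw [pvBef_false_iff]
  rcases h with h | ⟨h1, h2⟩
  · exact ⟨not_lt_of_gt h, Or.inl h⟩
  · exact ⟨h1, Or.inr (not_lt_of_gt h2)⟩

lemma pvBef_trans_neg (x y z : String × Int × String)
    (hxy : pvBef x y = true) (hzy : pvBef z y = false) : pvBef x z = true := by
  rw [pvBef_true_iff] at hxy
  rw [pvBef_false_iff] at hzy
  rw [pvBef_true_iff]
  rcases hzy with ⟨hz1, hz2⟩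
  rcases hxy with h | ⟨h1, h2⟩
  · exact Or.inl (lt_of_le_of_lt (not_lt.mp hz1) h)
  · have hzx : z.2.1 ≤ x.2.1 := le_trans (not_lt.mp hz1) (not_lt.mp h1)
    rcases lt_or_eq_of_le hzx with hlt | heq
    · exact Or.inl hlt
    · refine Or.inr ⟨by omega, ?_⟩
      rcases hz2 with hz2 | hz2
      · omega
      · exact lt_of_le_of_lt (not_lt.mp hz2) h2

lemma pvInsertBy_of_forall (x : String × Int × String) (l : List (String × Int × String))
    (h : ∀ z ∈ l, pvBef x z = true) : PySem.List.insertBy pvBef x l = x :: l := by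
  cases l with
  | nil => rfl
  | cons y ys => simp [PySem.List.insertBy, h y (List.mem_cons_self)]

-- filter commutes with one insertBy step into a list whose later elements never come before earlier ones
lemma pvFilter_insertBy (p : String × Int × String → Bool) (x : String × Int × String)
    (ys : List (String × Int × String)) (hp : ys.Pairwise (fun y z => pvBef z y = false)) :
    (PySem.List.insertBy pvBef x ys).filter p =
      if p x then PySem.List.insertBy pvBef x (ys.filter p) else ys.filter p := by
  induction ys with
  | nil => cases hpx : p x <;> simp [PySem.List.insertBy, hpx]
  | cons y ys ih =>
    rw [List.pairwise_cons] at hp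
    obtain ⟨hy, hys⟩ := hp
    cases hby : pvBef x y with
    | true =>
      cases hpx : p x with
      | false => simp [PySem.List.insertBy, hby, hpx, List.filter_cons]
      | true =>
        have hall : ∀ z ∈ (y :: ys).filter p, pvBef x z = true := by
          intro z hz
          have hz' := List.mem_of_mem_filter hz
          rcases List.mem_cons.mp hz' with rfl | hz''
          · exact hby
          · exact pvBef_trans_neg x y z hby (hy z hz'')
        rw [pvInsertBy_of_forall x _ hall]
        simp [PySem.List.insertBy, hby, hpx, List.filter_cons]
    | false =>
      have hstep : PySem.List.insertBy pvBef x (y :: ys) = y :: PySem.List.insertBy pvBef x ys := by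
        simp [PySem.List.insertBy, hby]
      rw [hstep]
      cases hpy : p y <;> cases hpx : p x <;>
        simp [List.filter_cons, hpy, hpx, ih hys, PySem.List.insertBy, hby]

-- the insertion-sort accumulator invariant
lemma pvInsertBy_pairwise (x : String × Int × String) (ys : List (String × Int × String))
    (hp : ys.Pairwise (fun y z => pvBef z y = false)) :
    (PySem.List.insertBy pvBef x ys).Pairwise (fun y z => pvBef z y = false) := by
  induction ys with
  | nil => simp [PySem.List.insertBy]
  | cons y ys ih =>
    rw [List.pairwise_cons] at hp
    obtain ⟨hy, hys⟩ := hp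
    cases hby : pvBef x y with
    | true =>
      have : PySem.List.insertBy pvBef x (y :: ys) = x :: y :: ys := by
        simp [PySem.List.insertBy, hby]
      rw [this, List.pairwise_cons]
      refine ⟨?_, List.pairwise_cons.mpr ⟨hy, hys⟩⟩
      intro z hz
      rcases List.mem_cons.mp hz with rfl | hz'
      · exact pvBef_asymm x z hby
      · exact pvBef_asymm x z (pvBef_trans_neg x y z hby (hy z hz'))
    | false =>
      have : PySem.List.insertBy pvBef x (y :: ys) = y :: PySem.List.insertBy pvBef x ys := by
        simp [PySem.List.insertBy, hby]
      rw [this, List.pairwise_cons]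
      refine ⟨?_, ih hys⟩
      intro z hz
      rcases (PySem.List.mem_insertBy pvBef x z ys).mp hz with rfl | hz'
      · exact hby
      · exact hy z hz'

-- filter commutes with the whole insertion-sort fold
lemma pvFilter_foldl (p : String × Int × String → Bool) (xs acc : List (String × Int × String))
    (hp : acc.Pairwise (fun y z => pvBef z y = false)) :
    (xs.foldl (fun a x => PySem.List.insertBy pvBef x a) acc).filter p =
      (xs.filter p).foldl (fun a x => PySem.List.insertBy pvBef x a) (acc.filter p) := by
  induction xs generalizing acc with
  | nil => rfl
  | cons x xs ih =>
    rw [List.foldl_cons, ih _ (pvInsertBy_pairwise x acc hp), pvFilter_insertBy p x acc hp,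
      List.filter_cons]
    cases hpx : p x <;> simp

lemma pvSorted2_eq_foldl (xs : List (String × Int × String)) :
    PySem.List.sorted2 xs (fun it => it.2.1) (fun it => it.2.2) true =
      xs.foldl (fun a x => PySem.List.insertBy pvBef x a) [] := rfl

-- filter commutes with the stable sort
lemma pvFilter_sorted2 (p : String × Int × String → Bool) (xs : List (String × Int × String)) :
    (PySem.List.sorted2 xs (fun it => it.2.1) (fun it => it.2.2) true).filter p =
      PySem.List.sorted2 (xs.filter p) (fun it => it.2.1) (fun it => it.2.2) true := by
  rw [pvSorted2_eq_foldl, pvSorted2_eq_foldl, pvFilter_foldl p xs [] List.Pairwise.nil]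
  rfl

-- the partitioning loop is three filters
lemma pvLoop_eq_filters (l : List (String × Int × String)) (a b c : List (String × String)) :
    l.foldl (fun acc kv =>
      if 0 < kv.2.1 then (acc.1 ++ [(kv.1, kv.2.2)], acc.2.1, acc.2.2)
      else if kv.2.1 = 0 then (acc.1, acc.2.1 ++ [(kv.1, kv.2.2)], acc.2.2)
      else (acc.1, acc.2.1, acc.2.2 ++ [(kv.1, kv.2.2)])) (a, b, c) =
      (a ++ (l.filter (fun kv => decide (0 < kv.2.1))).map (fun kv => (kv.1, kv.2.2)),
       b ++ (l.filter (fun kv => decide (kv.2.1 = 0))).map (fun kv => (kv.1, kv.2.2)),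
       c ++ (l.filter (fun kv => decide (kv.2.1 < 0))).map (fun kv => (kv.1, kv.2.2))) := by
  induction l generalizing a b c with
  | nil => simp
  | cons kv l ih =>
    by_cases h1 : 0 < kv.2.1
    · have h2 : ¬ kv.2.1 = 0 := by omega
      have h3 : ¬ kv.2.1 < 0 := by omega
      simp [List.foldl_cons, h1, h2, h3, List.filter_cons, ih]
    · by_cases h2 : kv.2.1 = 0
      · have h3 : ¬ kv.2.1 < 0 := by omega
        simp [List.foldl_cons, h1, h2, h3, List.filter_cons, ih]
      · have h3 : kv.2.1 < 0 := by omega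
        simp [List.foldl_cons, h1, h2, h3, List.filter_cons, ih]

-- rebuilding a dict from a nodup-keys item list returns the same list
lemma pvOfList_items_of_nodup (l : List (String × Int × String))
    (h : (l.map Prod.fst).Nodup) : (PySem.Dict.ofList l).items = l := by
  have hfresh : ∀ a ∈ l, (PySem.Dict.empty : PySem.Dict String (Int × String)).contains a.1 = false := by
    intro a _
    exact PySem.Dict.contains_empty a.1
  have := PySem.Dict.items_foldl_insert_fresh l Prod.fst Prod.snd PySem.Dict.empty hfresh h
  simpa [PySem.Dict.ofList, PySem.Dict.update, PySem.Dict.empty] using this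

-- ===== VERDICT (by name: the statement is the Claim_ definition above) =====
theorem create_test_reasons_spec : Claim_equal_create_test_reasons := by
  intro rt ts _
  unfold Spec_create_test_reasons create_test_reasons create_test_reasons_alt pvBucket
  have hnodup : ((PySem.List.sorted2 (PySem.Dict.ofList rt).items (fun it => it.2.1) (fun it => it.2.2) true).map Prod.fst).Nodup := by
    have hperm := PySem.List.sorted2_perm (PySem.Dict.ofList rt).items (fun it => it.2.1) (fun it => it.2.2) true
    have hkeys := PySem.Dict.nodup_keys_ofList (κ := String) (ν := Int × String) rt
    exact ((hperm.map Prod.fst).nodup_iff).mpr hkeys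
  rw [pvOfList_items_of_nodup _ hnodup, pvLoop_eq_filters,
      pvFilter_sorted2, pvFilter_sorted2, pvFilter_sorted2]
  simp
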